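-- pv_equiv track=rewrite | github.com/MrBrantCode/unitest_baseline | mut_generate/mist_train_cf/cf_67617/solution.py | prod_primes
-- ===== SOURCE A (Python) =====
-- import math
--
-- def find_primes(n, primes = [2]):
--     if primes[-1] >= n:
--         return [x for x in primes if x <= n]
--     else:
--         for i in range(primes[-1]+1, n+1):
--             is_prime = True
--             for j in range(2, int(math.sqrt(i))+1):
--                 if (i % j) == 0:
--                     is_prime = False
--                     break
--             if is_prime:
--                 primes.append(i)
--         return primes
--
-- def prod_primes(min_val, max_val):
--     if min_val > max_val:
--         raise Exception("Invalid range: minimum range value is greater than maximum range value")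
--     if min_val < 2:
--         raise Exception("Invalid range: minimum range value is less than 2")
--     primes = find_primes(max_val)
--     primes = [x for x in primes if x >= min_val]
--     prod_out = 1
--     for x in primes:
--         prod_out *= x
--     return prod_out
-- ===== SOURCE B (Python) =====
-- import math
--
-- def _balanced_prod(lst):
--     # product of lst as a balanced tree (keeps big-int factors of similar size)
--     if not lst:
--         return 1
--     if len(lst) == 1:
--         return lst[0]
--     mid = len(lst) // 2
--     return _balanced_prod(lst[:mid]) * _balanced_prod(lst[mid:])
--
-- def prod_primes(min_val, max_val):
--     if min_val > max_val:
--         raise Exception("Invalid range: minimum range value is greater than maximum range value")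
--     if min_val < 2:
--         raise Exception("Invalid range: minimum range value is less than 2")
--     # Sieve: mark every multiple m >= p*p of every p in [2, isqrt(max_val)] as composite.
--     is_comp = bytearray(max_val + 1)
--     for p in range(2, math.isqrt(max_val) + 1):
--         is_comp[p * p::p] = b"\x01" * len(range(p * p, max_val + 1, p))
--     primes = [x for x in range(min_val, max_val + 1) if not is_comp[x]]
--     return _balanced_prod(primes)
-- ===== Notes on version B (the rewrite author's own statement) =====
-- stated objective: faster
-- what changed: A trial-divides every number in the range up to its square root and multiplies left-to-right; B marks composites with a Sieve of Eratosthenes style table (every multiple m >= p*p of each p <= isqrt(max_val)) and multiplies the surviving numbers as a balanced product tree.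
import Mathlib
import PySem

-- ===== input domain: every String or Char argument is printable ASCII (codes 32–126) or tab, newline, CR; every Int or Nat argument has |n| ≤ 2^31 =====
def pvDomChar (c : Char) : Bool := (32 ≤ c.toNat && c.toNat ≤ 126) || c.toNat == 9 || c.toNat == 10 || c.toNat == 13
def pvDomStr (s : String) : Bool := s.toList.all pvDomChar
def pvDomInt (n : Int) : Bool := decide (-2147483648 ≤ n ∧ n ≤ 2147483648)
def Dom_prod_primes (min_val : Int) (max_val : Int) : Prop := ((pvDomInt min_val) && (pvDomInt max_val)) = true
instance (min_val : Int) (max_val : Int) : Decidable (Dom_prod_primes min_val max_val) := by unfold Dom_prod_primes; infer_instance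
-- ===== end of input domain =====

-- B replaces A's per-number trial division with a sieve (mark every multiple m ≥ p*p of each
-- p ≤ isqrt(max_val) as composite), then multiplies the unmarked numbers in [min_val, max_val].


-- ===== PORT A =====
-- inner loop 'for j in range(2, int(math.sqrt(i))+1): if i % j == 0: …' (flag+break = List.all).
-- int(math.sqrt(i)) = Nat.sqrt i.toNat exactly for the 0 ≤ i ≤ 2^31 of Dom (the double sqrt of
-- such i is within 2^-30 of the true value, so truncation agrees with the integer square root).
def pyIsPrimeA (i : Int) : Bool :=
  (PySem.List.pyRange 2 ((Nat.sqrt i.toNat : Int) + 1) 1).all (fun j => !(PySem.Int.mod i j == 0))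

-- find_primes(n) with its default primes=[2]; primes[-1] = 2 at entry.
def find_primes (n : Int) : List Int :=
  if 2 ≥ n then ([2] : List Int).filter (fun x => decide (x ≤ n))
  else (PySem.List.pyRange 3 (n + 1) 1).foldl
    (fun primes i => if pyIsPrimeA i then primes ++ [i] else primes) [2]

def prod_primes (min_val : Int) (max_val : Int) : Int :=
  -- the two 'raise' guards are exactly the inputs excluded by Pre_prod_primes
  let primes := find_primes max_val
  let primes2 := primes.filter (fun x => decide (min_val ≤ x))
  primes2.foldl (fun acc x => acc * x) 1

-- ===== PORT B =====
-- bytearray(max_val+1); for p in range(2, isqrt(max_val)+1): for m in range(p*p, max_val+1, p): is_comp[m] = 1.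
-- range(a, b[, p]) over these nonnegative bounds is List.range' a <Python's range length> [p].
def sieveB (n : Nat) : Array Bool :=
  (List.range' 2 (Nat.sqrt n + 1 - 2)).foldl
    (fun arr p =>
      (List.range' (p * p) ((n + 1 - p * p + (p - 1)) / p) p).foldl
        (fun a m => a.setIfInBounds m true) arr)
    (Array.replicate (n + 1) false)

-- _balanced_prod(lst); 'lst[0]' is read on a list of length 1, ported as headI; lst[:mid]/lst[mid:] = take/drop
def prodBal (l : List Int) : Int :=
  if l.length = 0 then 1
  else if l.length = 1 then l.headI
  else prodBal (l.take (l.length / 2)) * prodBal (l.drop (l.length / 2))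
termination_by l.length
decreasing_by
  · simp; omega
  · simp; omega

def prod_primes_alt (min_val : Int) (max_val : Int) : Int :=
  -- the two 'raise' guards are exactly the inputs excluded by Pre_prod_primes
  let n := max_val.toNat
  let isComp := sieveB n
  -- '[x for x in range(min_val, max_val+1) if not is_comp[x]]'; the read 'is_comp[x]' is always
  -- in range (x ≤ max_val < len(is_comp)), ported as getD
  let primes : List Int := List.map (fun x : Nat => (x : Int))
    ((List.range' min_val.toNat (n + 1 - min_val.toNat)).filter (fun x => !(isComp.getD x false)))
  prodBal primes

-- ===== PRECONDITION & SPEC =====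
-- Pre_ excludes exactly the inputs on which A raises its two explicit Exceptions.
def Pre_prod_primes (min_val : Int) (max_val : Int) : Prop :=
  2 ≤ min_val ∧ min_val ≤ max_val
instance (min_val : Int) (max_val : Int) : Decidable (Pre_prod_primes min_val max_val) := by
  unfold Pre_prod_primes; infer_instance

def pvWitness_prod_primes : Int × Int := (3, 10)

def Spec_prod_primes (min_val : Int) (max_val : Int) (out : Int) : Prop := out = prod_primes_alt min_val max_val
instance (min_val : Int) (max_val : Int) (out : Int) : Decidable (Spec_prod_primes min_val max_val out) := by unfold Spec_prod_primes; infer_instance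

-- ===== CLAIM (what is proved, stated in full; the proofs are below) =====
def Claim_equal_prod_primes : Prop := ∀ (min_val : Int) (max_val : Int), Dom_prod_primes min_val max_val → Pre_prod_primes min_val max_val → Spec_prod_primes min_val max_val (prod_primes min_val max_val)

-- ===== LEMMAS AND PROOFS =====

theorem getD_setIfInBounds (a : Array Bool) (i x : Nat) (v : Bool) (hx : x < a.size) :
    (a.setIfInBounds i v).getD x false = if x = i then v else a.getD x false := by
  have h2 : x < (a.setIfInBounds i v).size := by simpa using hx
  rw [Array.getD_eq_getD_getElem?, Array.getD_eq_getD_getElem?,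
      Array.getElem?_eq_getElem h2, Array.getElem?_eq_getElem hx,
      Array.getElem_setIfInBounds]
  by_cases hxi : x = i
  · simp [hxi]
  · simp [hxi]; intro h; exact absurd h.symm hxi
  exact hx

theorem size_foldl_set (l : List Nat) (arr : Array Bool) :
    (l.foldl (fun a m => a.setIfInBounds m true) arr).size = arr.size := by
  induction l generalizing arr with
  | nil => rfl
  | cons m l ih => simp [List.foldl_cons, ih]

theorem getD_foldl_set (l : List Nat) (arr : Array Bool) (x : Nat) (hx : x < arr.size) :
    (l.foldl (fun a m => a.setIfInBounds m true) arr).getD x false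
      = (arr.getD x false || decide (x ∈ l)) := by
  induction l generalizing arr with
  | nil => simp
  | cons m l ih =>
    simp only [List.foldl_cons]
    rw [ih _ (by simpa using hx), getD_setIfInBounds _ _ _ _ hx]
    by_cases hxm : x = m <;> simp [hxm]

theorem mem_inner_range (p n x : Nat) (hp : 2 ≤ p) :
    x ∈ List.range' (p * p) ((n + 1 - p * p + (p - 1)) / p) p
      ↔ p * p ≤ x ∧ x ≤ n ∧ p ∣ x := by
  rw [List.mem_range']
  constructor
  · rintro ⟨i, hi, rfl⟩
    have h1 : (i + 1) * p ≤ n + 1 - p * p + (p - 1) := (Nat.le_div_iff_mul_le (by omega)).mp hi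
    have h2 : p ∣ p * p + p * i := ⟨p + i, by ring⟩
    have h3 : (i + 1) * p = p * i + p := by ring
    refine ⟨by omega, by omega, h2⟩
  · rintro ⟨h1, h2, hd⟩
    obtain ⟨j, rfl⟩ := hd
    have hpj : p ≤ j := by nlinarith
    have hs : p * (j - p) = p * j - p * p := by rw [Nat.mul_sub]
    refine ⟨j - p, ?_, by omega⟩
    have : (j - p + 1) * p = p * (j - p) + p := by ring
    rw [Nat.lt_iff_add_one_le, Nat.le_div_iff_mul_le (by omega)]
    omega

theorem getD_foldl_outer (ps : List Nat) (n : Nat) (arr : Array Bool) (x : Nat)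
    (hx : x < arr.size) (hps : ∀ p ∈ ps, 2 ≤ p) :
    ((ps.foldl (fun arr p =>
        (List.range' (p * p) ((n + 1 - p * p + (p - 1)) / p) p).foldl
          (fun a m => a.setIfInBounds m true) arr) arr).getD x false)
      = (arr.getD x false || decide (∃ p ∈ ps, p * p ≤ x ∧ x ≤ n ∧ p ∣ x)) := by
  induction ps generalizing arr with
  | nil => simp
  | cons q ps ih =>
    simp only [List.foldl_cons]
    rw [ih _ (by rw [size_foldl_set]; exact hx) (fun p hp => hps p (List.mem_cons_of_mem _ hp)),
        getD_foldl_set _ _ _ hx]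
    have hq := hps q (List.mem_cons_self ..)
    rw [Bool.or_assoc]
    congr 1
    have h1 : (x ∈ List.range' (q * q) ((n + 1 - q * q + (q - 1)) / q) q)
        ↔ q * q ≤ x ∧ x ≤ n ∧ q ∣ x := mem_inner_range q n x hq
    simp only [List.mem_cons] at *
    rw [← Bool.decide_or]
    congr 1
    rw [eq_iff_iff, h1]
    aesop

theorem sieveB_getD (n x : Nat) (hx : x ≤ n) :
    (sieveB n).getD x false
      = decide (∃ p < Nat.sqrt n + 1, 2 ≤ p ∧ p * p ≤ x ∧ p ∣ x) := by
  unfold sieveB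
  rw [getD_foldl_outer _ n _ x (by simp; omega)
      (fun p hp => ((List.mem_range' ..).mp hp).elim (fun i hi => by omega))]
  have h0 : (Array.replicate (n + 1) false).getD x false = false := by
    simp [Array.getD]
  rw [h0, Bool.false_or]
  congr 1
  rw [eq_iff_iff]
  constructor
  · rintro ⟨p, hp, h1, h2, h3⟩
    rw [List.mem_range'_1] at hp
    exact ⟨p, by omega, by omega, h1, h3⟩
  · rintro ⟨p, hlt, h2, h1, h3⟩
    exact ⟨p, by rw [List.mem_range'_1]; omega, h1, hx, h3⟩

theorem marked_iff_not_prime (n x : Nat) (h2 : 2 ≤ x) (hxn : x ≤ n) :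
    (∃ p < Nat.sqrt n + 1, 2 ≤ p ∧ p * p ≤ x ∧ p ∣ x) ↔ ¬ Nat.Prime x := by
  constructor
  · rintro ⟨p, _, hp2, hpx, hdvd⟩ hprime
    rcases (Nat.Prime.eq_one_or_self_of_dvd hprime p hdvd) with h | h
    · omega
    · subst h; nlinarith
  · intro hnp
    refine ⟨x.minFac, ?_, ?_, ?_, Nat.minFac_dvd x⟩
    · have hsq : x.minFac ^ 2 ≤ x := Nat.minFac_sq_le_self (by omega) hnp
      have : x.minFac ≤ Nat.sqrt n := Nat.le_sqrt.mpr (by nlinarith [sq x.minFac])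
      omega
    · exact (Nat.minFac_prime (by omega)).two_le
    · have := Nat.minFac_sq_le_self (show 0 < x by omega) hnp
      nlinarith [sq x.minFac]

theorem pyIsPrimeA_eq (k : Nat) (hk : 2 ≤ k) :
    pyIsPrimeA (k : Int) = decide (Nat.Prime k) := by
  unfold pyIsPrimeA
  rw [Bool.eq_iff_iff]
  simp only [List.all_eq_true, PySem.List.mem_pyRange_one, Int.toNat_natCast,
    Bool.not_eq_eq_eq_not, Bool.not_true, beq_eq_false_iff_ne, ne_eq,
    PySem.Int.mod_eq_zero_iff_dvd, decide_eq_true_eq]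
  rw [Nat.prime_def_le_sqrt]
  constructor
  · intro h
    refine ⟨hk, fun m hm2 hms hdvd => ?_⟩
    exact h (m : Int) ⟨by omega, by omega⟩ (Int.natCast_dvd_natCast.mpr hdvd)
  · rintro ⟨-, h⟩ j ⟨hj2, hjs⟩ hdvd
    have hj0 : 0 ≤ j := by omega
    obtain ⟨m, rfl⟩ := Int.eq_ofNat_of_zero_le hj0
    exact h m (by omega) (by omega) (Int.natCast_dvd_natCast.mp hdvd)

theorem find_primes_eq (n : Nat) (hn : 2 ≤ n) :
    find_primes (n : Int)
      = (PySem.List.pyRange 2 ((n : Int) + 1) 1).filter (fun x => decide (Nat.Prime x.toNat)) := by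
  by_cases hn2 : n = 2
  · subst hn2; decide
  · rw [find_primes, if_neg (by omega)]
    rw [PySem.List.foldl_append_if_eq_filter]
    conv_rhs => rw [PySem.List.pyRange_one_cons (show (2:Int) < (n:Int)+1 by push_cast; omega)]
    rw [List.filter_cons_of_pos (by decide)]
    norm_num
    refine List.filter_congr fun x hx => ?_
    rw [PySem.List.mem_pyRange_one] at hx
    obtain ⟨y, rfl⟩ := Int.eq_ofNat_of_zero_le (by omega : 0 ≤ x)
    rw [pyIsPrimeA_eq y (by omega), Int.toNat_natCast]

theorem prodBal_eq_prod (l : List Int) : prodBal l = l.prod := by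
  induction l using prodBal.induct with
  | case1 l h => rw [prodBal]; simp_all [List.length_eq_zero_iff.mp h]
  | case2 l h h1 =>
    obtain ⟨a, rfl⟩ := List.length_eq_one_iff.mp h1
    rw [prodBal]; simp
  | case3 l h h1 ih1 ih2 =>
    rw [prodBal, if_neg h, if_neg h1, ih1, ih2, ← List.prod_append, List.take_append_drop]

theorem pyRange_cast (m c : Nat) :
    PySem.List.pyRange (m : Int) ((m : Int) + (c : Int)) 1
      = List.map (fun x : Nat => (x : Int)) (List.range' m c) := by
  have h : ((m : Int) + c - m).toNat = c := by omega
  simp only [PySem.List.pyRange_one, List.range'_eq_map_range, List.map_map, h]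
  exact List.map_congr_left fun k _ => by simp [Function.comp]

-- ===== VERDICT (by name: the statement is the Claim_ definition above) =====
theorem prod_primes_spec : Claim_equal_prod_primes := by
  intro min_val max_val hdom hpre
  unfold Spec_prod_primes
  obtain ⟨h2, hle⟩ := hpre
  obtain ⟨m, rfl⟩ := Int.eq_ofNat_of_zero_le (show 0 ≤ min_val by omega)
  obtain ⟨n, rfl⟩ := Int.eq_ofNat_of_zero_le (show 0 ≤ max_val by omega)
  have hm2 : 2 ≤ m := by exact_mod_cast h2
  have hmn : m ≤ n := by exact_mod_cast hle
  -- A side reduces to the product over the primes of [m, n]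
  have hA : prod_primes (m : Int) (n : Int)
      = (List.map (fun x : Nat => (x : Int))
          ((List.range' m (n + 1 - m)).filter (fun x => decide (Nat.Prime x)))).foldl
          (fun a b => a * b) 1 := by
    show ((find_primes (n : Int)).filter (fun x => decide ((m : Int) ≤ x))).foldl
        (fun acc x => acc * x) 1 = _
    rw [find_primes_eq n (by omega)]
    rw [PySem.List.pyRange_one_append 2 (m : Int) ((n : Int) + 1) (by omega)
        (by omega)]
    rw [List.filter_append, List.filter_append]
    have hnil : ((PySem.List.pyRange 2 (m : Int) 1).filter
        (fun x => decide (Nat.Prime x.toNat))).filter (fun x => decide ((m : Int) ≤ x)) = [] := by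
      rw [List.filter_eq_nil_iff]
      intro a ha
      have := (PySem.List.mem_pyRange_one.mp (List.mem_of_mem_filter ha)).2
      simp; omega
    have hself : ((PySem.List.pyRange (m : Int) ((n : Int) + 1) 1).filter
          (fun x => decide (Nat.Prime x.toNat))).filter (fun x => decide ((m : Int) ≤ x))
        = (PySem.List.pyRange (m : Int) ((n : Int) + 1) 1).filter
          (fun x => decide (Nat.Prime x.toNat)) := by
      rw [List.filter_eq_self]
      intro a ha
      have := (PySem.List.mem_pyRange_one.mp (List.mem_of_mem_filter ha)).1
      simp; omega
    rw [hnil, hself, List.nil_append]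
    have hcast : ((n : Int) + 1) = (m : Int) + ((n + 1 - m : Nat) : Int) := by omega
    rw [hcast, pyRange_cast, List.filter_map]
    congr 1
  -- B side reduces to the same product
  have hB : prod_primes_alt (m : Int) (n : Int)
      = (List.map (fun x : Nat => (x : Int))
          ((List.range' m (n + 1 - m)).filter (fun x => decide (Nat.Prime x)))).foldl
          (fun a b => a * b) 1 := by
    show prodBal (List.map (fun x : Nat => (x : Int))
        ((List.range' ((m : Int)).toNat (((n : Int)).toNat + 1 - ((m : Int)).toNat)).filter
          (fun x => !((sieveB ((n : Int)).toNat).getD x false)))) = _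
    simp only [Int.toNat_natCast]
    have hfc : (List.range' m (n + 1 - m)).filter (fun x => !((sieveB n).getD x false))
        = (List.range' m (n + 1 - m)).filter (fun x => decide (Nat.Prime x)) := by
      refine List.filter_congr fun x hx => ?_
      rw [List.mem_range'_1] at hx
      have hiff := marked_iff_not_prime n x (by omega) (by omega)
      by_cases hP : Nat.Prime x
      · have hg : (sieveB n).getD x false = false := by
          rw [sieveB_getD n x (by omega)]
          exact decide_eq_false fun hmk => (hiff.mp hmk) hP
        simp [hg, hP]
      · have hg : (sieveB n).getD x false = true := by
          rw [sieveB_getD n x (by omega)]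
          exact decide_eq_true (hiff.mpr hP)
        simp [hg, hP]
    rw [hfc, prodBal_eq_prod, List.prod_eq_foldl]
  rw [hA, hB]
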